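-- pv_equiv track=rewrite | github.com/danidtt/P1-CC-UFCG | 1-geral/funcoes-prontas.py | meu_insert
-- ===== SOURCE A (Python) =====
-- def meu_insert(lista, indice, elemento):
--     nova_lista = []
--     for i in range(len(lista)):
--         if indice == i:
--             auxiliar = lista[indice]
--             lista[indice] = elemento
--             nova_lista.append(lista[indice])
--             nova_lista.append(auxiliar)
--         else:
--             nova_lista.append(lista[i])
--
--     return nova_lista
-- ===== SOURCE B (Python) =====
-- def meu_insert(lista, indice, elemento):
--     if 0 <= indice < len(lista):
--         return lista[:indice] + [elemento] + lista[indice:]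
--     return lista[:]
-- ===== Notes on version B (the rewrite author's own statement) =====
-- stated objective: simpler
-- what changed: Replaces the per-index loop with the auxiliary-swap dance by a single range guard and slice concatenation (prefix + [elemento] + suffix, or a plain copy when the index is out of range); equivalence is about the return value only, A also mutates lista[indice] in place while B does not.
import Mathlib
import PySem

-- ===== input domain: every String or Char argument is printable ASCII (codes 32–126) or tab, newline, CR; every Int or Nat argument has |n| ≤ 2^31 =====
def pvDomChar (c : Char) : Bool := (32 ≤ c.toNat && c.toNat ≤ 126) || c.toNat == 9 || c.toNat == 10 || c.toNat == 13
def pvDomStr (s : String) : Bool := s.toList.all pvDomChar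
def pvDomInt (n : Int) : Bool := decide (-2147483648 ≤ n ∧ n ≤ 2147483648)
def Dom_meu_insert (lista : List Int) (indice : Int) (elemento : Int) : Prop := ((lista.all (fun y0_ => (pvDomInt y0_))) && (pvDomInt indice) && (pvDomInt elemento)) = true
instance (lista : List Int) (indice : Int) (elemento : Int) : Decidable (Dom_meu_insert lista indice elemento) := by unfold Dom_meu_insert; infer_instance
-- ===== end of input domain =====

-- B replaces A's index loop (with its auxiliary-swap insertion step) by a range guard plus
-- slice concatenation; equivalence is about the RETURN value only: A also mutates
-- lista[indice] in place when the index is in range, B does not mutate its argument.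

-- ===== PORT A =====
-- The loop state is the pair (lista, nova_lista): the branch 'indice == i' writes
-- lista[indice] = elemento (pySetD) before reading lista[indice] back.
def meu_insert (lista : List Int) (indice : Int) (elemento : Int) : List Int :=
  ((PySem.List.pyRange 0 (lista.length : Int) 1).foldl
    (fun (st : List Int × List Int) i =>
      if indice == i then
        let auxiliar := PySem.List.pyGetD st.1 indice 0
        let l' := PySem.List.pySetD st.1 indice elemento
        (l', st.2 ++ [PySem.List.pyGetD l' indice 0, auxiliar])
      else
        (st.1, st.2 ++ [PySem.List.pyGetD st.1 i 0]))
    (lista, [])).2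

-- ===== PORT B =====
def meu_insert_alt (lista : List Int) (indice : Int) (elemento : Int) : List Int :=
  if 0 ≤ indice ∧ indice < (lista.length : Int) then
    PySem.List.slice lista none (some indice) ++ [elemento] ++ PySem.List.slice lista (some indice) none
  else
    PySem.List.slice lista none none

-- ===== PRECONDITION & SPEC =====
def Spec_meu_insert (lista : List Int) (indice : Int) (elemento : Int) (out : List Int) : Prop := out = meu_insert_alt lista indice elemento
instance (lista : List Int) (indice : Int) (elemento : Int) (out : List Int) : Decidable (Spec_meu_insert lista indice elemento out) := by unfold Spec_meu_insert; infer_instance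

-- ===== CLAIM (what is proved, stated in full; the proofs are below) =====
def Claim_equal_meu_insert : Prop := ∀ (lista : List Int) (indice : Int) (elemento : Int), Dom_meu_insert lista indice elemento → Spec_meu_insert lista indice elemento (meu_insert lista indice elemento)

-- ===== LEMMAS AND PROOFS =====

-- A's loop body, named for the lemmas below
def pvStepA (indice elemento : Int) (st : List Int × List Int) (i : Int) : List Int × List Int :=
  if indice == i then
    let auxiliar := PySem.List.pyGetD st.1 indice 0
    let l' := PySem.List.pySetD st.1 indice elemento
    (l', st.2 ++ [PySem.List.pyGetD l' indice 0, auxiliar])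
  else
    (st.1, st.2 ++ [PySem.List.pyGetD st.1 i 0])

theorem meu_insert_eq_foldl_step (lista : List Int) (indice elemento : Int) :
    meu_insert lista indice elemento =
      ((PySem.List.pyRange 0 (lista.length : Int) 1).foldl (pvStepA indice elemento) (lista, [])).2 := rfl

-- over a range that never hits `indice`, the loop only copies elements of the (unchanged) list
theorem foldl_copy (indice elemento : Int) (a b : Int) (l acc : List Int)
    (h : ∀ i ∈ PySem.List.pyRange a b 1, indice ≠ i) :
    (PySem.List.pyRange a b 1).foldl (pvStepA indice elemento) (l, acc) =
      (l, acc ++ (PySem.List.pyRange a b 1).map (fun i => PySem.List.pyGetD l i 0)) := by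
  by_cases hab : a < b
  · rw [PySem.List.pyRange_one_cons hab] at *
    have h0 : indice ≠ a := h a (by simp)
    have := foldl_copy indice elemento (a + 1) b l (acc ++ [PySem.List.pyGetD l a 0])
      (fun i hi => h i (by simp [hi]))
    simp only [List.foldl_cons, List.map_cons, pvStepA, beq_iff_eq, if_neg h0]
    rw [this]
    simp
  · rw [PySem.List.pyRange_one_eq_nil (by omega)]
    simp
termination_by (b - a).toNat
decreasing_by omega

-- copying the first j elements of l yields l.take j
theorem map_pyGetD_take (l : List Int) (j : Nat) (hj : j ≤ l.length) :
    (PySem.List.pyRange 0 (j : Int) 1).map (fun i => PySem.List.pyGetD l i 0) = l.take j := by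
  induction j with
  | zero => simp [PySem.List.pyRange_one_eq_nil]
  | succ k ih =>
      rw [show ((k + 1 : Nat) : Int) = (k : Int) + 1 by push_cast; ring,
        PySem.List.pyRange_one_succ_right (by positivity), List.map_append, ih (by omega)]
      have hk : k < l.length := by omega
      rw [List.take_add_one]
      simp [List.getD, hk]

theorem meu_insert_spec_out (lista : List Int) (indice elemento : Int) :
    meu_insert lista indice elemento = meu_insert_alt lista indice elemento := by
  rw [meu_insert_eq_foldl_step]
  by_cases hin : 0 ≤ indice ∧ indice < (lista.length : Int)
  · -- in-range case: indice = (j : Nat), j < lista.length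
    obtain ⟨j, rfl⟩ := Int.eq_ofNat_of_zero_le hin.1
    have hj : j < lista.length := by exact_mod_cast hin.2
    -- split the range at j and at j+1
    rw [PySem.List.pyRange_one_append 0 (j : Int) (lista.length : Int) (by positivity)
        (by exact_mod_cast hj.le), List.foldl_append,
      foldl_copy (j : Int) elemento 0 (j : Int) lista []
        (by intro i hi; rw [PySem.List.mem_pyRange_one] at hi; omega),
      map_pyGetD_take lista j hj.le,
      PySem.List.pyRange_one_cons hin.2]
    simp only [List.foldl_cons, pvStepA, beq_self_eq_true, if_true]
    rw [foldl_copy _ _ _ _ _ _ (by intro i hi; rw [PySem.List.mem_pyRange_one] at hi; omega)]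
    -- characterise the pieces
    have hset : PySem.List.pySetD lista (j : Int) elemento = lista.set j elemento := by
      simp
    have hlen : ((lista.set j elemento).length : Int) = (lista.length : Int) := by simp
    rw [hset]
    have hcopy : (PySem.List.pyRange ((j : Int) + 1) (lista.length : Int) 1).map
        (fun i => PySem.List.pyGetD (lista.set j elemento) i 0) = lista.drop (j + 1) := by
      have h1 := PySem.List.map_pyGetD_pyRange' (lista.set j elemento) 0
        (show (0 : Int) ≤ (j : Int) + 1 by positivity)
      simp only [List.length_set] at h1
      rw [h1, show ((j : Int) + 1).toNat = j + 1 by omega,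
        List.drop_set_of_lt (by omega)]
    rw [hcopy]
    have hget : PySem.List.pyGetD (lista.set j elemento) (j : Int) 0 = elemento := by
      rw [PySem.List.pyGetD_natCast]
      simp [List.getD, hj]
    have hgetold : PySem.List.pyGetD lista (j : Int) 0 = lista[j] := by
      rw [PySem.List.pyGetD_natCast]
      simp [List.getD, List.getElem?_eq_getElem hj]
    rw [hget, hgetold]
    unfold meu_insert_alt
    rw [if_pos hin, PySem.List.slice_to_natCast, PySem.List.slice_from_natCast]
    have hdrop : lista.drop j = lista[j] :: lista.drop (j + 1) :=
      List.drop_eq_getElem_cons hj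
    rw [hdrop]
    simp
  · -- out-of-range case: the then-branch never fires, the loop copies lista
    rw [foldl_copy _ _ _ _ _ _
      (by intro i hi; rw [PySem.List.mem_pyRange_one] at hi; omega)]
    rw [PySem.List.map_pyGetD_pyRange_zero']
    unfold meu_insert_alt
    rw [if_neg hin, PySem.List.slice_none_none]
    simp

-- ===== VERDICT (by name: the statement is the Claim_ definition above) =====
theorem meu_insert_spec : Claim_equal_meu_insert := by
  intro lista indice elemento _
  unfold Spec_meu_insert
  exact meu_insert_spec_out lista indice elemento
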